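-- pv_equiv track=rewrite | github.com/pypi-data/pypi-mirror-403 | packages/code-knowledge-graph/code_knowledge_graph-0.1.2-py3-none-any.whl/core/services/dependency_analysis.py | _bfs_reachable_files
-- ===== SOURCE A (Python) =====
-- def _bfs_reachable_files(
--
--     target_file: str,
--     imports_adj: dict[str, set[str]],
--     imported_by_adj: dict[str, set[str]],
--     direction: str,
--     depth: int
-- ) -> set[str]:
--     """Find all files reachable from target_file within depth hops.
--
--     Uses BFS to traverse the import graph in the specified direction.
--
--     Args:
--         target_file: Starting file path
--         imports_adj: Adjacency list for "imports" direction
--         imported_by_adj: Adjacency list for "imported_by" direction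
--         direction: "imports", "imported_by", or "both"
--         depth: Maximum number of hops
--
--     Returns:
--         Set of reachable file paths (including target_file)
--     """
--     from collections import deque
--
--     reachable: set[str] = {target_file}
--     queue: deque[tuple[str, int]] = deque([(target_file, 0)])
--
--     while queue:
--         current, current_depth = queue.popleft()
--
--         if current_depth >= depth:
--             continue
--
--         neighbors: set[str] = set()
--
--         # Collect neighbors based on direction
--         if direction in ("imports", "both"):
--             neighbors.update(imports_adj.get(current, set()))
--         if direction in ("imported_by", "both"):
--             neighbors.update(imported_by_adj.get(current, set()))
--
--         for neighbor in neighbors: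
--             if neighbor not in reachable:
--                 reachable.add(neighbor)
--                 queue.append((neighbor, current_depth + 1))
--
--     return reachable
-- ===== SOURCE B (Python) =====
-- def _bfs_reachable_files(
--     target_file: str,
--     imports_adj: dict[str, set[str]],
--     imported_by_adj: dict[str, set[str]],
--     direction: str,
--     depth: int
-- ) -> set[str]:
--     """Naive (Datalog-style) fixed-point iteration: no queue, no frontier,
--     no visited bookkeeping.  Up to `depth` times, replace the reachable set
--     by itself plus the image of the WHOLE set under the one-step import
--     relation, stopping as soon as a round is a fixpoint.  After k rounds the
--     set is exactly the nodes within k hops, so this returns the same set as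
--     a depth-tagged BFS.
--     """
--     use_imports = direction in ("imports", "both")
--     use_imported_by = direction in ("imported_by", "both")
--
--     def image(nodes):
--         out = set()
--         for u in nodes:
--             if use_imports:
--                 out |= imports_adj.get(u, set())
--             if use_imported_by:
--                 out |= imported_by_adj.get(u, set())
--         return out
--
--     reachable = {target_file}
--     for _ in range(depth):
--         nxt = reachable | image(reachable)
--         if nxt == reachable:
--             break
--         reachable = nxt
--     return reachable
-- ===== Notes on version B (the rewrite author's own statement) =====
-- stated objective: alternative
-- what changed: Replaced the depth-tagged worklist BFS by a naive Datalog-style fixed-point iteration: no queue, no frontier, no visited test - each of up to depth rounds recomputes the image of the entire reachable set and unions it in, stopping at a fixpoint; correct because after k rounds the set is exactly the nodes within k hops.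
import Mathlib
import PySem

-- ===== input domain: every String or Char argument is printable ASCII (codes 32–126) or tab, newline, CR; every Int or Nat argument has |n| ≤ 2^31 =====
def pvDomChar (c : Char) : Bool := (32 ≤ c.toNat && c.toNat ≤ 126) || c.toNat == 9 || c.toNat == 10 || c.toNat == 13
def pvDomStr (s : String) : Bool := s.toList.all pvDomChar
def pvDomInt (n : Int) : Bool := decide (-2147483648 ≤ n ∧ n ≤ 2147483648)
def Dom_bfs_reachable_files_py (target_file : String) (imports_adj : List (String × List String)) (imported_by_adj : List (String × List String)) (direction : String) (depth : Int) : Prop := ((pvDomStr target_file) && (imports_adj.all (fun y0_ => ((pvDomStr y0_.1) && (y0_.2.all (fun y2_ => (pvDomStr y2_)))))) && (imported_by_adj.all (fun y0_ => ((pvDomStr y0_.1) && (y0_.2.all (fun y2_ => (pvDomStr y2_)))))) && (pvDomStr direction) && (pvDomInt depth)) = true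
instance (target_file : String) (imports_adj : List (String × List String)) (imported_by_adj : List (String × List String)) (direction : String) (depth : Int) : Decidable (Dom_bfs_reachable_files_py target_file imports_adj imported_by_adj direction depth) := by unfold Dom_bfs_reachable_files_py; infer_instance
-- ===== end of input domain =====

-- One honest line: B replaces A's depth-tagged worklist BFS by a naive fixed-point
-- iteration (each of up to `depth` rounds unions in the image of the WHOLE reachable
-- set, stopping at a fixpoint); same reachable set, proved equal as lists.

-- ===== PORT A =====
-- while queue: pop (current, d); skip if d >= depth; else collect neighbor set and
-- enqueue/record unseen neighbors.  The Nat argument is a fuel guard making the loop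
-- total; `1 + number of neighbor entries in both dicts` is proven sufficient below.
def pvLoopA (ia ib : List (String × List String)) (dir : String) (depth : Int) :
    Nat → PySem.Set String → List (String × Int) → PySem.Set String
  | _, reach, [] => reach
  | 0, reach, _ :: _ => reach
  | n + 1, reach, (c, d) :: rest =>
      if d ≥ depth then pvLoopA ia ib dir depth n reach rest
      else
        -- neighbors = set(); conditional updates from the two adjacency dicts
        let ns1 : PySem.Set String :=
          if dir == "imports" || dir == "both" then
            PySem.Set.update PySem.Set.empty ((PySem.Dict.mk ia).getD c []) else PySem.Set.empty
        let ns : PySem.Set String :=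
          if dir == "imported_by" || dir == "both" then
            PySem.Set.update ns1 ((PySem.Dict.mk ib).getD c []) else ns1
        -- for neighbor in neighbors: if neighbor not in reachable: add + append
        let rq := ns.foldl
          (fun (rq : PySem.Set String × List (String × Int)) nb =>
            if nb ∈ rq.1 then rq else (PySem.Set.add rq.1 nb, rq.2 ++ [(nb, d + 1)]))
          (reach, rest)
        pvLoopA ia ib dir depth n rq.1 rq.2

def bfs_reachable_files_py (target_file : String) (imports_adj : List (String × List String)) (imported_by_adj : List (String × List String)) (direction : String) (depth : Int) : List String :=
  let fuel := ((imports_adj.map Prod.snd).flatten ++ (imported_by_adj.map Prod.snd).flatten).length + 1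
  pvLoopA imports_adj imported_by_adj direction depth fuel
    (PySem.Set.ofList [target_file]) [(target_file, 0)]

-- ===== PORT B =====
-- def image(nodes): out = set(); for u in nodes: out |= the (direction-enabled) dict lookups
def pvImageB (ia ib : List (String × List String)) (useI useB : Bool)
    (nodes : PySem.Set String) : PySem.Set String :=
  nodes.foldl (fun s u =>
    let s1 := if useI then PySem.Set.update s ((PySem.Dict.mk ia).getD u []) else s
    if useB then PySem.Set.update s1 ((PySem.Dict.mk ib).getD u []) else s1)
    PySem.Set.empty

-- for _ in range(depth): nxt = reachable | image(reachable); break if nxt == reachable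
-- (Python's `==` on sets is PySem.Set.equal)
def pvRoundsB (ia ib : List (String × List String)) (useI useB : Bool) :
    Nat → PySem.Set String → PySem.Set String
  | 0, reach => reach
  | k + 1, reach =>
      let nxt := PySem.Set.update reach (pvImageB ia ib useI useB reach)
      if PySem.Set.equal nxt reach then reach
      else pvRoundsB ia ib useI useB k nxt

def bfs_reachable_files_py_alt (target_file : String) (imports_adj : List (String × List String)) (imported_by_adj : List (String × List String)) (direction : String) (depth : Int) : List String :=
  let useI : Bool := direction == "imports" || direction == "both"
  let useB : Bool := direction == "imported_by" || direction == "both"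
  pvRoundsB imports_adj imported_by_adj useI useB depth.toNat (PySem.Set.ofList [target_file])

-- ===== PRECONDITION & SPEC =====
def Spec_bfs_reachable_files_py (target_file : String) (imports_adj : List (String × List String)) (imported_by_adj : List (String × List String)) (direction : String) (depth : Int) (out : List String) : Prop := out = bfs_reachable_files_py_alt target_file imports_adj imported_by_adj direction depth
instance (target_file : String) (imports_adj : List (String × List String)) (imported_by_adj : List (String × List String)) (direction : String) (depth : Int) (out : List String) : Decidable (Spec_bfs_reachable_files_py target_file imports_adj imported_by_adj direction depth out) := by unfold Spec_bfs_reachable_files_py; infer_instance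

-- ===== CLAIM (what is proved, stated in full; the proofs are below) =====
def Claim_equal_bfs_reachable_files_py : Prop := ∀ (target_file : String) (imports_adj : List (String × List String)) (imported_by_adj : List (String × List String)) (direction : String) (depth : Int), Dom_bfs_reachable_files_py target_file imports_adj imported_by_adj direction depth → Spec_bfs_reachable_files_py target_file imports_adj imported_by_adj direction depth (bfs_reachable_files_py target_file imports_adj imported_by_adj direction depth)

-- ===== LEMMAS AND PROOFS =====

-- `pvNew r l`: the elements of `l` not in `r`, first occurrences, in order —
-- exactly the nodes one round adds to `reachable` when `r` is reachable so far.
def pvNew (r : List String) : List String → List String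
  | [] => []
  | x :: l => if x ∈ r then pvNew r l else x :: pvNew (r ++ [x]) l

-- neighbours of one node, as the raw concatenation of the two dict lookups
def pvNbr (ia ib : List (String × List String)) (useI useB : Bool) (c : String) : List String :=
  (if useI then (PySem.Dict.mk ia).getD c [] else []) ++
  (if useB then (PySem.Dict.mk ib).getD c [] else [])

-- neighbours of a whole node list
def pvLnbrs (ia ib : List (String × List String)) (useI useB : Bool) (fs : List String) : List String :=
  (fs.map (pvNbr ia ib useI useB)).flatten

-- all neighbour entries of both dicts (the fuel universe)
def pvU (ia ib : List (String × List String)) : List String :=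
  (ia.map Prod.snd).flatten ++ (ib.map Prod.snd).flatten

-- fuel potential: how many neighbour entries are not yet reachable
def pvPhi (ia ib : List (String × List String)) (r : List String) : Nat :=
  ((pvU ia ib).filter (fun x => !decide (x ∈ r))).length

-- proof-side level-synchronous reference loop, the common shape both ports reduce to
def pvLevelB (ia ib : List (String × List String)) (useI useB : Bool) :
    Nat → PySem.Set String → PySem.Set String → PySem.Set String
  | 0, reach, _ => reach
  | k + 1, reach, frontier =>
      let nw := pvNew reach (pvLnbrs ia ib useI useB frontier)
      if nw.isEmpty then reach
      else pvLevelB ia ib useI useB k (reach ++ nw) nw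

lemma pvNew_mem {r l : List String} {x : String} (h : x ∈ pvNew r l) : x ∈ l ∧ x ∉ r := by
  induction l generalizing r with
  | nil => simp [pvNew] at h
  | cons y l ih =>
      by_cases hy : y ∈ r
      · simp only [pvNew, if_pos hy] at h
        rcases ih h with ⟨h1, h2⟩
        exact ⟨by simp [h1], h2⟩
      · simp only [pvNew, if_neg hy] at h
        rcases List.mem_cons.mp h with h | h
        · exact ⟨by simp [h], h ▸ hy⟩
        · rcases ih h with ⟨h1, h2⟩
          exact ⟨by simp [h1], fun hc => h2 (by simp [hc])⟩

lemma pvMem_new {r l : List String} {x : String} (hl : x ∈ l) (hr : x ∉ r) :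
    x ∈ pvNew r l := by
  induction l generalizing r with
  | nil => simp at hl
  | cons y l ih =>
      by_cases hy : y ∈ r
      · have hx : x ∈ l := by
          rcases List.mem_cons.mp hl with h | h
          · exact absurd (h ▸ hy) hr
          · exact h
        simpa [pvNew, hy] using ih hx hr
      · simp only [pvNew, if_neg hy]
        rcases List.mem_cons.mp hl with h | h
        · simp [h]
        · by_cases hxy : x = y
          · simp [hxy]
          · exact List.mem_cons.mpr (Or.inr (ih h (by simp [hr, hxy])))

lemma pvNew_nodup (r l : List String) : (pvNew r l).Nodup := by
  induction l generalizing r with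
  | nil => simp [pvNew]
  | cons y l ih =>
      by_cases hy : y ∈ r
      · simpa [pvNew, hy] using ih r
      · simp only [pvNew, if_neg hy, List.nodup_cons]
        exact ⟨fun hc => (pvNew_mem hc).2 (by simp), ih (r ++ [y])⟩

lemma pvNew_append (r l1 l2 : List String) :
    pvNew r (l1 ++ l2) = pvNew r l1 ++ pvNew (r ++ pvNew r l1) l2 := by
  induction l1 generalizing r with
  | nil => simp [pvNew]
  | cons y l1 ih =>
      by_cases hy : y ∈ r
      · simp [pvNew, hy, ih]
      · simp [pvNew, hy, ih (r ++ [y]), List.append_assoc]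

lemma pvNew_idem {s r : List String} (l : List String) (hs : ∀ x ∈ s, x ∈ r) :
    pvNew r (pvNew s l) = pvNew r l := by
  induction l generalizing s r with
  | nil => rfl
  | cons y l ih =>
      by_cases hy : y ∈ s
      · simp [pvNew, hy, hs y hy, ih hs]
      · simp only [pvNew, if_neg hy]
        by_cases hyr : y ∈ r
        · simp only [if_pos hyr]
          exact ih (s := s ++ [y]) (fun x hx => by
            rcases List.mem_append.mp hx with h | h
            · exact hs x h
            · simpa using (by simpa using h) ▸ hyr)
        · simp only [if_neg hyr]
          exact congrArg _ (ih (s := s ++ [y]) (fun x hx => by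
            rcases List.mem_append.mp hx with h | h
            · exact List.mem_append.mpr (Or.inl (hs x h))
            · simp [List.mem_append, h]))

lemma pvNew_of_subset {r l : List String} (h : ∀ x ∈ l, x ∈ r) : pvNew r l = [] := by
  induction l with
  | nil => rfl
  | cons y l ih =>
      simp only [pvNew, if_pos (h y (by simp))]
      exact ih (fun x hx => h x (by simp [hx]))

lemma pvUpdate_eq (l : List String) (s : PySem.Set String) :
    PySem.Set.update s l = s ++ pvNew s l := by
  induction l generalizing s with
  | nil => simp [PySem.Set.update, pvNew]
  | cons y l ih =>
      by_cases hy : y ∈ s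
      · rw [PySem.Set.update_cons, PySem.Set.add_of_mem hy]
        simp [ih, pvNew, hy]
      · rw [PySem.Set.update_cons, PySem.Set.add_of_not_mem hy]
        simp [ih, pvNew, hy, List.append_assoc]

-- A's inner for-loop over one neighbour list
lemma pvFoldStep (d : Int) (l : List String) :
    ∀ (r : PySem.Set String) (q : List (String × Int)),
    l.foldl
      (fun (rq : PySem.Set String × List (String × Int)) nb =>
        if nb ∈ rq.1 then rq else (PySem.Set.add rq.1 nb, rq.2 ++ [(nb, d + 1)]))
      (r, q)
    = (r ++ pvNew r l, q ++ (pvNew r l).map (fun c => (c, d + 1))) := by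
  induction l with
  | nil => intro r q; simp [pvNew]
  | cons y l ih =>
      intro r q
      rw [List.foldl_cons]
      by_cases hy : y ∈ r
      · rw [if_pos (show y ∈ (r, q).1 from hy), ih]
        simp [pvNew, hy]
      · rw [if_neg (show ¬ y ∈ (r, q).1 from hy)]
        have h2 : ((PySem.Set.add (r, q).1 y : PySem.Set String), (r, q).2 ++ [(y, d + 1)])
            = ((r ++ [y] : List String), q ++ [(y, d + 1)]) := by
          simp [PySem.Set.add_of_not_mem hy]
        rw [h2, ih]
        simp [pvNew, hy, List.append_assoc]

-- every dict value element is in the flattened values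
lemma pvGetD_subset (adj : List (String × List String)) (c x : String)
    (h : x ∈ (PySem.Dict.mk adj).getD c []) : x ∈ (adj.map Prod.snd).flatten := by
  rcases hg : (PySem.Dict.mk adj).get? c with _ | v
  · rw [PySem.Dict.getD_eq_get?_getD, hg] at h; simp at h
  · rw [PySem.Dict.getD_eq_get?_getD, hg] at h
    simp only [Option.getD_some] at h
    have : ∃ p ∈ adj, p.2 = v := by
      simp only [PySem.Dict.get?, Option.map_eq_some_iff] at hg
      rcases hg with ⟨p, hp, hv⟩
      exact ⟨p, List.mem_of_find?_eq_some hp, hv⟩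
    rcases this with ⟨p, hp, rfl⟩
    exact List.mem_flatten.mpr ⟨p.2, List.mem_map.mpr ⟨p, hp, rfl⟩, h⟩

lemma pvNbr_subset (ia ib : List (String × List String)) (useI useB : Bool) (c x : String)
    (h : x ∈ pvNbr ia ib useI useB c) : x ∈ pvU ia ib := by
  rcases List.mem_append.mp h with h | h
  · cases useI with
    | false => simp at h
    | true => exact List.mem_append.mpr (Or.inl (pvGetD_subset ia c x (by simpa using h)))
  · cases useB with
    | false => simp at h
    | true => exact List.mem_append.mpr (Or.inr (pvGetD_subset ib c x (by simpa using h)))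

lemma pvLnbrs_subset (ia ib : List (String × List String)) (useI useB : Bool) (fs : List String)
    (x : String) (h : x ∈ pvLnbrs ia ib useI useB fs) : x ∈ pvU ia ib := by
  rcases List.mem_flatten.mp h with ⟨l, hl, hx⟩
  rcases List.mem_map.mp hl with ⟨c, _, rfl⟩
  exact pvNbr_subset ia ib useI useB c x hx

-- the fuel potential strictly pays for each level's new nodes
lemma pvPhi_step (ia ib : List (String × List String)) (r l : List String)
    (hl : ∀ x ∈ l, x ∈ pvU ia ib) :
    (pvNew r l).length + pvPhi ia ib (r ++ pvNew r l) ≤ pvPhi ia ib r := by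
  classical
  set nw := pvNew r l with hnw
  set F := (pvU ia ib).filter (fun x => !decide (x ∈ r)) with hF
  have hsplit : F.length = (F.filter (fun x => decide (x ∈ nw))).length
      + (F.filter (fun x => !decide (x ∈ nw))).length :=
    List.length_eq_length_filter_add (fun x => decide (x ∈ nw))
  have h1 : nw.length ≤ (F.filter (fun x => decide (x ∈ nw))).length := by
    have hsub : nw ⊆ F.filter (fun x => decide (x ∈ nw)) := by
      intro x hx
      rcases pvNew_mem (hnw ▸ hx) with ⟨hxl, hxr⟩
      refine List.mem_filter.mpr ⟨List.mem_filter.mpr ⟨hl x hxl, by simp [hxr]⟩, by simpa using hx⟩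
    have hnd : nw.Nodup := hnw ▸ pvNew_nodup r l
    exact (hnd.subperm hsub).length_le
  have h2 : pvPhi ia ib (r ++ nw) = (F.filter (fun x => !decide (x ∈ nw))).length := by
    rw [pvPhi, hF, List.filter_filter]
    refine congrArg _ (List.filter_congr (fun x _ => ?_))
    simp [List.mem_append, Bool.and_comm]
  have h3 : pvPhi ia ib r = F.length := by rw [pvPhi, hF]
  omega

-- skipping a whole frontier whose depth is exhausted
lemma pvSkip (ia ib : List (String × List String)) (dir : String) (depth d : Int)
    (hd : d ≥ depth) (fs : List String) :
    ∀ (n : Nat) (r : PySem.Set String),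
      pvLoopA ia ib dir depth (fs.length + n) r (fs.map (fun c => (c, d))) = r := by
  induction fs with
  | nil => intro n r; cases n <;> rfl
  | cons c fs ih =>
      intro n r
      have : (c :: fs).length + n = (fs.length + n) + 1 := by simp [List.length_cons]; omega
      rw [this]
      simp only [List.map_cons, pvLoopA, if_pos hd]
      exact ih n r

-- `pvLoopA` on an empty queue returns `reachable` for any fuel
lemma pvLoopA_nil (ia ib : List (String × List String)) (dir : String) (depth : Int)
    (n : Nat) (r : PySem.Set String) : pvLoopA ia ib dir depth n r [] = r := by
  cases n <;> rfl

-- A's neighbour-set construction for one node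
lemma pvNsA_eq (ia ib : List (String × List String)) (dir c : String) :
    (let ns1 : PySem.Set String :=
       if dir == "imports" || dir == "both" then
         PySem.Set.update PySem.Set.empty ((PySem.Dict.mk ia).getD c []) else PySem.Set.empty
     if dir == "imported_by" || dir == "both" then
       PySem.Set.update ns1 ((PySem.Dict.mk ib).getD c []) else ns1)
    = pvNew [] (pvNbr ia ib (dir == "imports" || dir == "both")
        (dir == "imported_by" || dir == "both") c) := by
  cases h1 : (dir == "imports" || dir == "both") <;>
    cases h2 : (dir == "imported_by" || dir == "both") <;>
      simp [pvNbr, pvUpdate_eq, pvNew_append, pvNew, PySem.Set.empty]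

-- processing one whole frontier level of A's queue
lemma pvLevelA (ia ib : List (String × List String)) (dir : String) (depth d : Int)
    (hd : d < depth) (fs : List String) :
    ∀ (r : PySem.Set String) (ys : List String) (n : Nat),
      pvLoopA ia ib dir depth (fs.length + n) r
        (fs.map (fun c => (c, d)) ++ ys.map (fun c => (c, d + 1)))
      = pvLoopA ia ib dir depth n
          (r ++ pvNew r (pvLnbrs ia ib (dir == "imports" || dir == "both")
                                        (dir == "imported_by" || dir == "both") fs))
          ((ys ++ pvNew r (pvLnbrs ia ib (dir == "imports" || dir == "both")
                                        (dir == "imported_by" || dir == "both") fs)).map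
            (fun c => (c, d + 1))) := by
  induction fs with
  | nil => intro r ys n; simp [pvLnbrs, pvNew]
  | cons c fs ih =>
      intro r ys n
      have hlen : (c :: fs).length + n = ((fs.length + n)) + 1 := by
        simp [List.length_cons]; omega
      rw [hlen]
      simp only [List.map_cons, List.cons_append, pvLoopA, if_neg (not_le.mpr hd)]
      rw [pvNsA_eq, pvFoldStep]
      rw [pvNew_idem _ (fun x hx => absurd hx (List.not_mem_nil))]
      have hq : (fs.map (fun c => (c, d)) ++ ys.map (fun c => (c, d + 1)))
            ++ (pvNew r (pvNbr ia ib (dir == "imports" || dir == "both")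
                  (dir == "imported_by" || dir == "both") c)).map (fun c => (c, d + 1))
          = fs.map (fun c => (c, d))
            ++ (ys ++ pvNew r (pvNbr ia ib (dir == "imports" || dir == "both")
                  (dir == "imported_by" || dir == "both") c)).map (fun c => (c, d + 1)) := by
        simp [List.map_append, List.append_assoc]
      rw [hq, ih]
      have hL : pvLnbrs ia ib (dir == "imports" || dir == "both")
            (dir == "imported_by" || dir == "both") (c :: fs)
          = pvNbr ia ib (dir == "imports" || dir == "both")
              (dir == "imported_by" || dir == "both") c
            ++ pvLnbrs ia ib (dir == "imports" || dir == "both")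
                (dir == "imported_by" || dir == "both") fs := by
        simp [pvLnbrs]
      rw [hL, pvNew_append]
      simp [List.append_assoc]

-- B's per-node image-fold step is union with that node's neighbours
lemma pvStepB (ia ib : List (String × List String)) (useI useB : Bool) :
    (fun (s : PySem.Set String) (node : String) =>
       let s1 := if useI then PySem.Set.update s ((PySem.Dict.mk ia).getD node []) else s
       if useB then PySem.Set.update s1 ((PySem.Dict.mk ib).getD node []) else s1)
    = fun (s : PySem.Set String) (node : String) =>
        s ++ pvNew s (pvNbr ia ib useI useB node) := by
  funext s node
  cases useI <;> cases useB <;>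
    simp [pvNbr, pvUpdate_eq, pvNew_append, pvNew, List.append_assoc]

lemma pvFoldNbr (ia ib : List (String × List String)) (useI useB : Bool) (fs : List String) :
    ∀ (s : PySem.Set String),
      fs.foldl (fun (s : PySem.Set String) (node : String) =>
          s ++ pvNew s (pvNbr ia ib useI useB node)) s
      = s ++ pvNew s (pvLnbrs ia ib useI useB fs) := by
  induction fs with
  | nil => intro s; simp [pvLnbrs, pvNew]
  | cons c fs ih =>
      intro s
      rw [List.foldl_cons, ih]
      have hL : pvLnbrs ia ib useI useB (c :: fs)
          = pvNbr ia ib useI useB c ++ pvLnbrs ia ib useI useB fs := by simp [pvLnbrs]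
      rw [hL, pvNew_append, List.append_assoc]

-- B's image of a node list, in closed form
lemma pvImageB_eq (ia ib : List (String × List String)) (useI useB : Bool)
    (nodes : PySem.Set String) :
    pvImageB ia ib useI useB nodes = pvNew [] (pvLnbrs ia ib useI useB nodes) := by
  rw [pvImageB, pvStepB, pvFoldNbr]
  simp [PySem.Set.empty]

-- the main induction linking A to the level loop: A's fueled queue loop equals pvLevelB
lemma pvBridge (ia ib : List (String × List String)) (dir : String) (depth : Int) :
    ∀ (k : Nat) (d : Int), (depth - d).toNat = k →
    ∀ (r fs : List String) (n : Nat), pvPhi ia ib r ≤ n →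
      pvLoopA ia ib dir depth (fs.length + n) r (fs.map (fun c => (c, d)))
      = pvLevelB ia ib (dir == "imports" || dir == "both")
          (dir == "imported_by" || dir == "both") k r fs := by
  intro k
  induction k with
  | zero =>
      intro d hk r fs n _
      have hd : d ≥ depth := by omega
      rw [pvSkip ia ib dir depth d hd fs n r]
      rfl
  | succ k ih =>
      intro d hk r fs n hn
      have hd : d < depth := by omega
      have hstep := pvLevelA ia ib dir depth d hd fs r [] n
      simp only [List.map_nil, List.append_nil, List.nil_append] at hstep
      rw [hstep]
      set uI := (dir == "imports" || dir == "both") with huI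
      set uB := (dir == "imported_by" || dir == "both") with huB
      set L := pvLnbrs ia ib uI uB fs with hLdef
      set nw := pvNew r L with hnw
      have hB : pvLevelB ia ib uI uB (k + 1) r fs
          = if nw.isEmpty then r else pvLevelB ia ib uI uB k (r ++ nw) nw := rfl
      rw [hB]
      by_cases hnil : nw = []
      · rw [if_pos (by simp [hnil])]
        rw [hnil]
        simp only [List.append_nil, List.map_nil]
        exact pvLoopA_nil ia ib dir depth n r
      · rw [if_neg (by simp [hnil])]
        have hLU : ∀ x ∈ L, x ∈ pvU ia ib := fun x hx => pvLnbrs_subset ia ib uI uB fs x hx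
        have hphi := pvPhi_step ia ib r L hLU
        rw [← hnw] at hphi
        have hfuel : nw.length ≤ n := by omega
        have hn' : pvPhi ia ib (r ++ nw) ≤ n - nw.length := by omega
        have := ih (d + 1) (by omega) (r ++ nw) nw (n - nw.length) hn'
        rw [Nat.add_sub_cancel' hfuel] at this
        exact this

-- Set.equal of `r ++ nw` with `r` holds exactly when a round added nothing
lemma pvEqual_append (r nw : List String) (hnw : ∀ x ∈ nw, x ∉ r) :
    PySem.Set.equal (r ++ nw) r = nw.isEmpty := by
  cases nw with
  | nil => simp [PySem.Set.equal, PySem.Set.issubset, PySem.Set.contains]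
  | cons y nw' =>
      simp only [List.isEmpty_cons]
      have hy : y ∉ r := hnw y (by simp)
      simp only [PySem.Set.equal]
      have : PySem.Set.issubset (r ++ y :: nw') r = false := by
        simp only [PySem.Set.issubset, List.all_eq_false]
        exact ⟨y, by simp, by simp [PySem.Set.contains, hy]⟩
      simp [this]

-- the second induction: B's whole-set fixpoint rounds equal the level loop,
-- given that the already-processed prefix `p` has all its neighbours inside `p ++ fs`
lemma pvRounds_eq (ia ib : List (String × List String)) (useI useB : Bool) :
    ∀ (k : Nat) (p fs : List String),
      (∀ x ∈ pvLnbrs ia ib useI useB p, x ∈ p ++ fs) →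
      pvRoundsB ia ib useI useB k (p ++ fs) = pvLevelB ia ib useI useB k (p ++ fs) fs := by
  intro k
  induction k with
  | zero => intro p fs _; rfl
  | succ k ih =>
      intro p fs hp
      set r := p ++ fs with hr
      set Lfs := pvLnbrs ia ib useI useB fs with hLfs
      set nw := pvNew r Lfs with hnw
      -- the round's additions over the WHOLE set collapse to the frontier's additions
      have himg : PySem.Set.update r (pvImageB ia ib useI useB r) = r ++ nw := by
        rw [pvImageB_eq, pvUpdate_eq, pvNew_idem _ (fun x hx => absurd hx (List.not_mem_nil))]
        have hsplit : pvLnbrs ia ib useI useB r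
            = pvLnbrs ia ib useI useB p ++ Lfs := by
          simp [hr, pvLnbrs, hLfs]
        rw [hsplit, pvNew_append, pvNew_of_subset hp, List.append_nil, ← hnw]
        simp
      have hmemnw : ∀ x ∈ nw, x ∉ r := fun x hx => (pvNew_mem (hnw ▸ hx)).2
      have hroundB : pvRoundsB ia ib useI useB (k + 1) r
          = if PySem.Set.equal (r ++ nw) r then r
            else pvRoundsB ia ib useI useB k (r ++ nw) := by
        simp only [pvRoundsB, himg]
      have hlevel : pvLevelB ia ib useI useB (k + 1) r fs
          = if nw.isEmpty then r else pvLevelB ia ib useI useB k (r ++ nw) nw := rfl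
      rw [hroundB, hlevel, pvEqual_append r nw hmemnw]
      by_cases hnil : nw = []
      · simp [hnil]
      · rw [if_neg (by simp [hnil]), if_neg (by simp [hnil])]
        have hp' : ∀ x ∈ pvLnbrs ia ib useI useB r, x ∈ r ++ nw := by
          intro x hx
          have hxsplit : x ∈ pvLnbrs ia ib useI useB p ∨ x ∈ Lfs := by
            have : pvLnbrs ia ib useI useB r = pvLnbrs ia ib useI useB p ++ Lfs := by
              simp [hr, pvLnbrs, hLfs]
            rw [this] at hx
            exact List.mem_append.mp hx
          rcases hxsplit with h | h
          · exact List.mem_append.mpr (Or.inl (hp x h))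
          · by_cases hxr : x ∈ r
            · exact List.mem_append.mpr (Or.inl hxr)
            · exact List.mem_append.mpr (Or.inr (hnw ▸ pvMem_new h hxr))
        exact ih r nw hp'

-- ===== VERDICT (by name: the statement is the Claim_ definition above) =====
theorem bfs_reachable_files_py_spec : Claim_equal_bfs_reachable_files_py := by
  intro target_file ia ib dir depth _
  unfold Spec_bfs_reachable_files_py
  simp only [bfs_reachable_files_py, bfs_reachable_files_py_alt]
  have hsingle : PySem.Set.ofList [target_file] = [target_file] := rfl
  rw [hsingle]
  have hq : [(target_file, (0 : Int))] = [target_file].map (fun c => (c, (0 : Int))) := rfl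
  rw [hq]
  have hfuel : ((ia.map Prod.snd).flatten ++ (ib.map Prod.snd).flatten).length + 1
      = [target_file].length + ((ia.map Prod.snd).flatten ++ (ib.map Prod.snd).flatten).length := by
    simp [Nat.add_comm]
  rw [hfuel]
  rw [pvBridge ia ib dir depth depth.toNat 0 (by simp) [target_file] [target_file]
    ((ia.map Prod.snd).flatten ++ (ib.map Prod.snd).flatten).length
    (List.length_filter_le _ _)]
  exact (pvRounds_eq ia ib (dir == "imports" || dir == "both")
    (dir == "imported_by" || dir == "both") depth.toNat [] [target_file]
    (fun x hx => absurd hx (by simp [pvLnbrs]))).symm
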